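-- pv_equiv track=rewrite | github.com/aedan-leavitt/CS4110-Coding-Project | formal_languages_assignment.py | is_in_language_L
-- ===== SOURCE A (Python) =====
-- def is_in_language_L(string):
--     """
--     Check if a string belongs to language L = {a^n b^n | n >= 1}
--
--     Args:
--         string (str): Input string to check
--
--     Returns:
--         bool: True if string is in L, False otherwise
--
--     Examples:
--         is_in_language_L("ab") -> True
--         is_in_language_L("aabb") -> True
--         is_in_language_L("aaabbb") -> True
--         is_in_language_L("aba") -> False
--         is_in_language_L("") -> False
--     """
--     count_a = 0
--     count_b = 0
--     for char in string:
--         if char == 'a':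
--             count_a += 1
--         if char == 'b':
--             count_b += 1
--
--     if count_a != count_b or count_a == 0 or count_b == 0:
--         return False
--
--     seen_b = False
--     for char in string:
--         if char == 'a' and seen_b:
--             return False
--         if char == 'b':
--             seen_b = True
--     return True
--     pass
-- ===== SOURCE B (Python) =====
-- def is_in_language_L(string):
--     ab = [c for c in string if c in ('a', 'b')]
--     n = len(ab) // 2
--     return len(ab) > 0 and len(ab) % 2 == 0 and ab == ['a'] * n + ['b'] * n
-- ===== Notes on version B (the rewrite author's own statement) =====
-- stated objective: simpler
-- what changed: B projects the string onto its 'a'/'b' characters and equality-compares that projection to the canonical a^n b^n target, replacing A's count-then-order-flag double scan.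
import Mathlib
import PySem

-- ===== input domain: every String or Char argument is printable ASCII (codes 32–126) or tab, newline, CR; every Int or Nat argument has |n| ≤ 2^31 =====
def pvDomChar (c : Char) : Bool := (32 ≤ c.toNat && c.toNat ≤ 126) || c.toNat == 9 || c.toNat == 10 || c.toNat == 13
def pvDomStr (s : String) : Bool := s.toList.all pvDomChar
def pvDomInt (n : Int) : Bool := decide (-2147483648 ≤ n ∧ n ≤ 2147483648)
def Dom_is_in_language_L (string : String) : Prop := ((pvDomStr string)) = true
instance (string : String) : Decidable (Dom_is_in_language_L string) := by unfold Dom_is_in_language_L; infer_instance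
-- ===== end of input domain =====

-- B replaces A's count-then-order-flag double scan by projecting the string onto its
-- 'a'/'b' characters and comparing the projection to the canonical a^n b^n target (objective: simpler).


-- ===== PORT A =====
-- second loop of A: early return False when an 'a' follows a seen 'b'
def pvScanA : List Char → Bool → Bool
  | [], _ => true
  | c :: t, seen => if c = 'a' ∧ seen then false else pvScanA t (seen || decide (c = 'b'))

def is_in_language_L (string : String) : Bool :=
  let counts := string.toList.foldl
    (fun (p : Nat × Nat) c =>
      ((if c = 'a' then p.1 + 1 else p.1), (if c = 'b' then p.2 + 1 else p.2))) (0, 0)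
  if counts.1 ≠ counts.2 ∨ counts.1 = 0 ∨ counts.2 = 0 then false
  else pvScanA string.toList false

-- ===== PORT B =====
def is_in_language_L_alt (string : String) : Bool :=
  let ab := string.toList.filter (fun c => c == 'a' || c == 'b')
  let n := ab.length / 2
  decide (ab.length > 0) && decide (ab.length % 2 = 0) &&
    decide (ab = List.replicate n 'a' ++ List.replicate n 'b')

-- ===== PRECONDITION & SPEC =====
def Spec_is_in_language_L (string : String) (out : Bool) : Prop := out = is_in_language_L_alt string
instance (string : String) (out : Bool) : Decidable (Spec_is_in_language_L string out) := by unfold Spec_is_in_language_L; infer_instance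

-- ===== CLAIM (what is proved, stated in full; the proofs are below) =====
def Claim_equal_is_in_language_L : Prop := ∀ (string : String), Dom_is_in_language_L string → Spec_is_in_language_L string (is_in_language_L string)

-- ===== LEMMAS AND PROOFS =====

lemma pvCounts (l : List Char) (x y : Nat) :
    l.foldl (fun (p : Nat × Nat) c =>
      ((if c = 'a' then p.1 + 1 else p.1), (if c = 'b' then p.2 + 1 else p.2))) (x, y)
      = (x + l.count 'a', y + l.count 'b') := by
  induction l generalizing x y with
  | nil => simp
  | cons c t ih =>
    simp only [List.foldl_cons, ih, List.count_cons]
    by_cases ha : c = 'a' <;> by_cases hb : c = 'b' <;>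
      simp_all [beq_iff_eq] <;> omega

lemma pvScanA_true (l : List Char) :
    pvScanA l true = true ↔ 'a' ∉ l := by
  induction l with
  | nil => simp [pvScanA]
  | cons c t ih =>
    by_cases ha : c = 'a'
    · simp [pvScanA, ha]
    · simp [pvScanA, ha, ih, Ne.symm ha]

lemma pvFilter_noA (l : List Char) (h : 'a' ∉ l) :
    l.filter (fun c => c == 'a' || c == 'b') = List.replicate (l.count 'b') 'b' := by
  induction l with
  | nil => simp
  | cons c t ih =>
    have hc : c ≠ 'a' := fun e => h (e ▸ List.mem_cons_self ..)
    have ht : 'a' ∉ t := fun m => h (List.mem_cons_of_mem _ m)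
    by_cases hb : c = 'b'
    · simp [hb, List.count_cons, ih ht, List.replicate_succ]
    · simp [List.filter_cons, hc, hb, List.count_cons, ih ht]

lemma pvScanA_false (l : List Char) :
    pvScanA l false = true ↔
      l.filter (fun c => c == 'a' || c == 'b')
        = List.replicate (l.count 'a') 'a' ++ List.replicate (l.count 'b') 'b' := by
  induction l with
  | nil => simp [pvScanA]
  | cons c t ih =>
    by_cases ha : c = 'a'
    · subst ha
      simp only [pvScanA, List.filter_cons, List.count_cons]
      simp [ih, List.replicate_succ]
    · by_cases hb : c = 'b'
      · subst hb
        have hstep : pvScanA ('b' :: t) false = pvScanA t true := by simp [pvScanA]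
        rw [hstep, pvScanA_true]
        have hfa : ('b' :: t).filter (fun c => c == 'a' || c == 'b')
            = 'b' :: t.filter (fun c => c == 'a' || c == 'b') := by simp
        have hc1 : ('b' :: t).count 'a' = t.count 'a' := by simp [List.count_cons]
        have hc2 : ('b' :: t).count 'b' = t.count 'b' + 1 := by simp [List.count_cons]
        rw [hfa, hc1, hc2]
        constructor
        · intro hnoA
          have h0 : t.count 'a' = 0 := List.count_eq_zero.mpr hnoA
          simp [h0, pvFilter_noA t hnoA, List.replicate_succ]
        · intro hf
          by_cases h0 : t.count 'a' = 0
          · exact List.count_eq_zero.mp h0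
          · exfalso
            obtain ⟨k, hk⟩ : ∃ k, t.count 'a' = k + 1 := ⟨t.count 'a' - 1, by omega⟩
            rw [hk] at hf
            have hba : 'b' = 'a' := by
              have := congrArg (fun xs => xs.head?) hf
              simpa [List.replicate_succ] using this
            exact absurd hba (by decide)
      · simp only [pvScanA, List.filter_cons, List.count_cons]
        simp [ha, hb, ih, Ne.symm ha, Ne.symm hb]

lemma pv_main (l : List Char) :
    (let counts := l.foldl
      (fun (p : Nat × Nat) c =>
        ((if c = 'a' then p.1 + 1 else p.1), (if c = 'b' then p.2 + 1 else p.2))) (0, 0)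
     if counts.1 ≠ counts.2 ∨ counts.1 = 0 ∨ counts.2 = 0 then false
     else pvScanA l false)
    =
    (let ab := l.filter (fun c => c == 'a' || c == 'b')
     let n := ab.length / 2
     decide (ab.length > 0) && decide (ab.length % 2 = 0) &&
       decide (ab = List.replicate n 'a' ++ List.replicate n 'b')) := by
  simp only [pvCounts, Nat.zero_add]
  set ca := l.count 'a' with hca
  set cb := l.count 'b' with hcb
  set ab := l.filter (fun c => c == 'a' || c == 'b') with hab
  have hlen : ab.length = ca + cb := by
    rw [hab, hca, hcb]
    induction l with
    | nil => simp
    | cons c t ih =>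
      by_cases h1 : c = 'a' <;> by_cases h2 : c = 'b' <;>
        simp_all [List.count_cons] <;> omega
  have hcountA : ab.count 'a' = ca := by
    rw [hab, hca, List.count_filter]; simp
  have hcountB : ab.count 'b' = cb := by
    rw [hab, hcb, List.count_filter]; simp
  by_cases heq : ca = cb
  · by_cases h0 : ca = 0
    · -- counts zero: A false; B: ab empty, length > 0 fails
      have hz : ab.length = 0 := by omega
      rw [if_pos (Or.inr (Or.inl h0))]
      simp [hz]
    · -- equal nonzero counts
      have hL : ab.length / 2 = ca := by omega
      have hm : ab.length % 2 = 0 := by omega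
      have hpos : ab.length > 0 := by omega
      rw [if_neg (by omega)]
      have hiff := pvScanA_false l
      rw [← hab, ← hca, ← hcb] at hiff
      simp only [hL, hm, hpos, heq, decide_true, Bool.true_and]
      by_cases hp : ab = List.replicate cb 'a' ++ List.replicate cb 'b'
      · simp [hp, hiff.mpr (by rw [hp, ← heq])]
      · have hne : pvScanA l false = false := by
          rw [Bool.eq_false_iff]
          intro h
          exact hp (by rw [heq] at hiff; exact hiff.mp h)
        simp [hp, hne]
  · -- unequal counts: A false; B's equality cannot hold
    rw [if_pos (Or.inl heq)]
    have hne : ab ≠ List.replicate (ab.length / 2) 'a' ++ List.replicate (ab.length / 2) 'b' := by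
      intro he
      have : ab.count 'a' = ab.length / 2 ∧ ab.count 'b' = ab.length / 2 := by
        rw [he]; constructor <;> simp [List.count_append, List.count_replicate] <;> omega
      omega
    simp [hne]

-- ===== VERDICT (by name: the statement is the Claim_ definition above) =====
theorem is_in_language_L_spec : Claim_equal_is_in_language_L := by
  intro s _
  unfold Spec_is_in_language_L is_in_language_L is_in_language_L_alt
  exact pv_main s.toList
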